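-- pv_equiv track=rewrite | github.com/clement-moulin-frier/vivarium | vivarium/environments/braitenberg/selective_sensing/init.py | check_agent_and_object
-- ===== SOURCE A (Python) =====
-- def check_agent_and_object(ent_data):
--     has_agent = False
--     has_object = False
--
--     for entity in ent_data.values():
--         if entity["type"] == "AGENT":
--             has_agent = True
--         elif entity["type"] == "OBJECT":
--             has_object = True
--
--         # If both are found, no need to continue checking
--         if has_agent and has_object:
--             break
--
--     return has_agent, has_object
-- ===== SOURCE B (Python) =====
-- def check_agent_and_object(ent_data):
--     return (any(e["type"] == "AGENT" for e in ent_data.values()),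
--             any(e["type"] == "OBJECT" for e in ent_data.values()))
-- ===== Notes on version B (the rewrite author's own statement) =====
-- stated objective: idiomatic
-- what changed: Replaces A's single fused loop with two boolean accumulators and a break by two independent staged any() scans, one per question.
import Mathlib
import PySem

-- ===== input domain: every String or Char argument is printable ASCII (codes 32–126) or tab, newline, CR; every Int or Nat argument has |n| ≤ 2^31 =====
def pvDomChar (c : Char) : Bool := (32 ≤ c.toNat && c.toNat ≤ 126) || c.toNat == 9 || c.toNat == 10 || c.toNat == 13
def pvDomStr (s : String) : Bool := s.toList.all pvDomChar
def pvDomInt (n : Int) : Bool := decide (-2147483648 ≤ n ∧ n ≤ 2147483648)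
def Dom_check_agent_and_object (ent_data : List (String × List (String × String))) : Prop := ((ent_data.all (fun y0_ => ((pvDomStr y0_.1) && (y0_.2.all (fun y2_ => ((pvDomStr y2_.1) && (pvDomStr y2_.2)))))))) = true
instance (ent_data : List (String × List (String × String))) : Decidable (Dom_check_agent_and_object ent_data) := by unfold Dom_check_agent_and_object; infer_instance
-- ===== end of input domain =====

-- B answers each question with its own staged any() scan over the values,
-- instead of A's single fused loop over two boolean accumulators with a break.


-- ===== PORT A =====
-- A's loop over ent_data.values(): two boolean accumulators, break once both are set.
-- entity["type"] is Dict.getD under Pre_ (the key is present on every admitted input).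
def pvALoop : List (List (String × String)) → Bool → Bool → Bool × Bool
  | [], has_agent, has_object => (has_agent, has_object)
  | e :: rest, has_agent, has_object =>
    let t := (PySem.Dict.ofList e).getD "type" ""
    let st := if t = "AGENT" then (true, has_object)
              else if t = "OBJECT" then (has_agent, true)
              else (has_agent, has_object)
    if st.1 && st.2 then st else pvALoop rest st.1 st.2

def check_agent_and_object (ent_data : List (String × List (String × String))) : Bool × Bool :=
  pvALoop (PySem.Dict.ofList ent_data).values false false

-- ===== PORT B =====
-- two independent any() scans (List.any short-circuits like Python's any)
def check_agent_and_object_alt (ent_data : List (String × List (String × String))) : Bool × Bool :=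
  ((PySem.Dict.ofList ent_data).values.any
      (fun e => (PySem.Dict.ofList e).getD "type" "" == "AGENT"),
   (PySem.Dict.ofList ent_data).values.any
      (fun e => (PySem.Dict.ofList e).getD "type" "" == "OBJECT"))

-- ===== PRECONDITION & SPEC =====
-- Pre_ excludes inputs where some entity dict lacks the key "type": there Python raises
-- KeyError on the first such entity it evaluates (except when the early break in A — and the
-- short-circuit of B's any() — stops before it; both programs then return the same value).
def Pre_check_agent_and_object (ent_data : List (String × List (String × String))) : Prop :=
  ∀ p ∈ ent_data, "type" ∈ p.2.map (·.1)
instance (ent_data : List (String × List (String × String))) : Decidable (Pre_check_agent_and_object ent_data) := by unfold Pre_check_agent_and_object; infer_instance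

def pvWitness_check_agent_and_object : (List (String × List (String × String))) :=
  [("a1", [("type", "AGENT")]), ("o1", [("type", "OBJECT")])]

def Spec_check_agent_and_object (ent_data : List (String × List (String × String))) (out : Bool × Bool) : Prop := out = check_agent_and_object_alt ent_data
instance (ent_data : List (String × List (String × String))) (out : Bool × Bool) : Decidable (Spec_check_agent_and_object ent_data out) := by unfold Spec_check_agent_and_object; infer_instance

-- ===== CLAIM (what is proved, stated in full; the proofs are below) =====
def Claim_equal_check_agent_and_object : Prop := ∀ (ent_data : List (String × List (String × String))), Dom_check_agent_and_object ent_data → Pre_check_agent_and_object ent_data → Spec_check_agent_and_object ent_data (check_agent_and_object ent_data)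

-- ===== LEMMAS AND PROOFS =====

-- A's early-exit loop computes "some entity has type AGENT / OBJECT" or-ed into the accumulators.
lemma pvALoop_eq (es : List (List (String × String))) (ha ho : Bool) :
    pvALoop es ha ho =
      (ha || es.any (fun e => (PySem.Dict.ofList e).getD "type" "" == "AGENT"),
       ho || es.any (fun e => (PySem.Dict.ofList e).getD "type" "" == "OBJECT")) := by
  induction es generalizing ha ho with
  | nil => simp [pvALoop]
  | cons e rest ih =>
    simp only [pvALoop, List.any_cons]
    by_cases hA : (PySem.Dict.ofList e).getD "type" "" = "AGENT"
    · cases ho with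
      | true => simp [hA]
      | false => simp [hA, ih]
    · by_cases hO : (PySem.Dict.ofList e).getD "type" "" = "OBJECT"
      · cases ha with
        | true => simp [hO]
        | false => simp [hO, ih]
      · have hO' : ((PySem.Dict.ofList e).getD "type" "" == "OBJECT") = false := by
          simpa using hO
        cases ha with
        | true =>
          cases ho with
          | true => simp [hA, hO]
          | false => simp [hA, hO, hO', ih]
        | false => simp [hA, hO, hO', ih]

-- ===== VERDICT (by name: the statement is the Claim_ definition above) =====
theorem check_agent_and_object_spec : Claim_equal_check_agent_and_object := by
  intro ent_data _ _
  show check_agent_and_object ent_data = check_agent_and_object_alt ent_data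
  unfold check_agent_and_object check_agent_and_object_alt
  simp only [pvALoop_eq, Bool.false_or]
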